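-- pv_equiv track=rewrite | github.com/varmaleena/agentic-content-planner | content_generator.py | _fallback_parse_ideas
-- ===== SOURCE A (Python) =====
-- def _fallback_parse_ideas(raw_response: str, days: list, topic: str) -> list:
--     """
--     Fallback method to extract ideas from unstructured text.
--     """
--     ideas_final = []
--     lines = [line.strip() for line in raw_response.split('\n') if line.strip()]
--
--     # Look for day-prefixed lines
--     for day in days:
--         found_line = None
--         for line in lines:
--             if line.lower().startswith(day.lower()):
--                 found_line = line
--                 break
--
--         if found_line and ":" in found_line:
--             idea = found_line.split(":", 1)[1].strip()
--             ideas_final.append(idea)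
--         else:
--             ideas_final.append(f"Content idea for {day.lower()} about {topic}")
--
--     return ideas_final
-- ===== SOURCE B (Python) =====
-- def _fallback_parse_ideas(raw_response: str, days: list, topic: str) -> list:
--     """
--     Fallback method to extract ideas from unstructured text.
--     One pass over the lines builds an index day.lower() -> first matching line,
--     then the answer is emitted per day from that index.
--     """
--     lines = [line.strip() for line in raw_response.split('\n') if line.strip()]
--     wanted = [day.lower() for day in days]
--     table = {}
--     for line in lines:
--         low = line.lower()
--         for d in wanted:
--             if d not in table and low.startswith(d):
--                 table[d] = line
--     out = []
--     for d in wanted: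
--         line = table.get(d)
--         if line is not None and ":" in line:
--             out.append(line.split(":", 1)[1].strip())
--         else:
--             out.append(f"Content idea for {d} about {topic}")
--     return out
-- ===== Notes on version B (the rewrite author's own statement) =====
-- stated objective: alternative
-- what changed: Replaces A's per-day rescan of all lines (nested find-first loop for each day) by a single pass over the lines that builds a dict from each lowercased day to its first matching line, then emits the per-day ideas by table lookup.
import Mathlib
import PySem

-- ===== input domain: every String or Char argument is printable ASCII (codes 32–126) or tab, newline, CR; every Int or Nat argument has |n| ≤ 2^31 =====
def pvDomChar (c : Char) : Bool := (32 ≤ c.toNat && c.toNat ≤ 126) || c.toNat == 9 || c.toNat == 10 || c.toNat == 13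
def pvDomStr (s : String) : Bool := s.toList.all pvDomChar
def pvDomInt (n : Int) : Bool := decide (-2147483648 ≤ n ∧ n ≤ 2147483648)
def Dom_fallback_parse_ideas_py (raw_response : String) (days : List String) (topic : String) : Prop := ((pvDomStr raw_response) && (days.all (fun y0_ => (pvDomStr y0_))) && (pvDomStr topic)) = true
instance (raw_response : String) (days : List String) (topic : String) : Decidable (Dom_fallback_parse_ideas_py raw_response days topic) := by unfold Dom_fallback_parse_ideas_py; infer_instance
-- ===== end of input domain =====

-- B replaces A's per-day rescanning of all lines by one pass over the lines that builds an
-- index (first matching line per lowercased day) and then emits the answers from the index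
-- (objective: alternative structure; same results).

-- ===== PORT A =====
-- per-day scan: first line whose lowercasing starts with day.lower(), then append idea or fallback
def fallback_parse_ideas_py (raw_response : String) (days : List String) (topic : String) : List String :=
  let lines := (((PySem.Str.split? raw_response "\n").getD []).map (fun l => PySem.Str.strip l)).filter (fun s => s != "")
  days.foldl (fun acc day =>
    let found_line : Option String :=
      lines.find? (fun line => PySem.Str.startswith (PySem.Str.lower line) (PySem.Str.lower day))
    match found_line with
    | some line =>
        if PySem.Str.isIn ":" line then
          acc ++ [PySem.Str.strip (((PySem.Str.splitMax? line ":" 1).getD []).getD 1 "")]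
        else
          acc ++ ["Content idea for " ++ PySem.Str.lower day ++ " about " ++ topic]
    | none => acc ++ ["Content idea for " ++ PySem.Str.lower day ++ " about " ++ topic]) []

-- ===== PORT B =====
-- helper _emit: idea from the indexed line (if any), else the fallback message
def pvEmit (line? : Option String) (d : String) (topic : String) : String :=
  match line? with
  | some line =>
      if PySem.Str.isIn ":" line then
        PySem.Str.strip (((PySem.Str.splitMax? line ":" 1).getD []).getD 1 "")
      else "Content idea for " ++ d ++ " about " ++ topic
  | none => "Content idea for " ++ d ++ " about " ++ topic

def fallback_parse_ideas_py_alt (raw_response : String) (days : List String) (topic : String) : List String :=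
  let lines := (((PySem.Str.split? raw_response "\n").getD []).map (fun l => PySem.Str.strip l)).filter (fun s => s != "")
  let wanted := days.map (fun day => PySem.Str.lower day)
  let table : PySem.Dict String String :=
    lines.foldl (fun t line =>
      wanted.foldl (fun t d =>
        if t.contains d = false && PySem.Str.startswith (PySem.Str.lower line) d then t.insert d line else t) t)
      PySem.Dict.empty
  wanted.map (fun d => pvEmit (table.get? d) d topic)

-- ===== PRECONDITION & SPEC =====
def Spec_fallback_parse_ideas_py (raw_response : String) (days : List String) (topic : String) (out : List String) : Prop := out = fallback_parse_ideas_py_alt raw_response days topic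
instance (raw_response : String) (days : List String) (topic : String) (out : List String) : Decidable (Spec_fallback_parse_ideas_py raw_response days topic out) := by unfold Spec_fallback_parse_ideas_py; infer_instance

-- ===== CLAIM (what is proved, stated in full; the proofs are below) =====
def Claim_equal_fallback_parse_ideas_py : Prop := ∀ (raw_response : String) (days : List String) (topic : String), Dom_fallback_parse_ideas_py raw_response days topic → Spec_fallback_parse_ideas_py raw_response days topic (fallback_parse_ideas_py raw_response days topic)

-- ===== LEMMAS AND PROOFS =====

-- the step of B's inner loop over the wanted days, for one line
def pvStep (line : String) (t : PySem.Dict String String) (wanted : List String) : PySem.Dict String String :=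
  wanted.foldl (fun t d =>
    if t.contains d = false && PySem.Str.startswith (PySem.Str.lower line) d then t.insert d line else t) t

lemma pvStep_get? (line d : String) :
    ∀ (wanted : List String) (t : PySem.Dict String String),
      (pvStep line t wanted).get? d =
        if d ∈ wanted ∧ t.get? d = none ∧ PySem.Str.startswith (PySem.Str.lower line) d = true
        then some line else t.get? d := by
  intro wanted
  induction wanted with
  | nil => intro t; simp [pvStep]
  | cons d' rest ih =>
    intro t
    simp only [pvStep, List.foldl_cons] at ih ⊢
    rw [ih]
    by_cases hne : d = d'
    · subst hne
      by_cases hc : t.contains d = false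
      · have hnone : t.get? d = none := by
          rw [PySem.Dict.contains_eq_isSome_get?] at hc
          exact Option.not_isSome_iff_eq_none.mp (by simp [hc])
        by_cases hsw : PySem.Str.startswith (PySem.Str.lower line) d = true
        · simp at hsw
          simp [hc, hsw, hnone, PySem.Dict.get?_insert_self]
        · simp at hsw
          simp [hc, hsw, hnone]
      · have hsome : t.get? d ≠ none := by
          rw [PySem.Dict.contains_eq_isSome_get?] at hc
          simpa [Option.isSome_iff_ne_none] using hc
        simp [hc, hsome]
    · have hstep : (if t.contains d' = false && PySem.Str.startswith (PySem.Str.lower line) d' then t.insert d' line else t).get? d = t.get? d := by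
        split_ifs with h
        · exact PySem.Dict.get?_insert_of_ne t line hne
        · rfl
      rw [hstep]
      simp [hne]

lemma pvBuild_get?_of_some (wanted : List String) (d v : String) :
    ∀ (lines : List String) (t : PySem.Dict String String), t.get? d = some v →
      (lines.foldl (fun t line => pvStep line t wanted) t).get? d = some v := by
  intro lines
  induction lines with
  | nil => intro t ht; simpa using ht
  | cons line rest ih =>
    intro t ht
    simp only [List.foldl_cons]
    apply ih
    rw [pvStep_get? line d wanted t]
    simp [ht]

lemma pvBuild_get? (wanted : List String) (d : String) (hmem : d ∈ wanted) :
    ∀ (lines : List String) (t : PySem.Dict String String), t.get? d = none →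
      (lines.foldl (fun t line => pvStep line t wanted) t).get? d =
        lines.find? (fun line => PySem.Str.startswith (PySem.Str.lower line) d) := by
  intro lines
  induction lines with
  | nil => intro t ht; simpa using ht
  | cons line rest ih =>
    intro t ht
    simp only [List.foldl_cons]
    by_cases hsw : PySem.Str.startswith (PySem.Str.lower line) d = true
    all_goals simp at hsw
    · have h1 : (pvStep line t wanted).get? d = some line := by
        rw [pvStep_get?]; simp [hmem, ht, hsw]
      rw [pvBuild_get?_of_some wanted d line rest _ h1]
      simp [hsw]
    · have h1 : (pvStep line t wanted).get? d = none := by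
        rw [pvStep_get?]; simp [hsw, ht]
      rw [ih _ h1]
      simp [hsw]

-- ===== VERDICT (by name: the statement is the Claim_ definition above) =====
theorem fallback_parse_ideas_py_spec : Claim_equal_fallback_parse_ideas_py := by
  intro raw_response days topic _
  unfold Spec_fallback_parse_ideas_py fallback_parse_ideas_py fallback_parse_ideas_py_alt
  set lines := (((PySem.Str.split? raw_response "\n").getD []).map (fun l => PySem.Str.strip l)).filter (fun s => s != "") with hlines
  set wanted := days.map (fun day => PySem.Str.lower day) with hwanted
  -- A's append-loop is a map
  have hA : days.foldl (fun acc day =>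
      match lines.find? (fun line => PySem.Str.startswith (PySem.Str.lower line) (PySem.Str.lower day)) with
      | some line =>
          if PySem.Str.isIn ":" line then
            acc ++ [PySem.Str.strip (((PySem.Str.splitMax? line ":" 1).getD []).getD 1 "")]
          else
            acc ++ ["Content idea for " ++ PySem.Str.lower day ++ " about " ++ topic]
      | none => acc ++ ["Content idea for " ++ PySem.Str.lower day ++ " about " ++ topic]) [] =
      days.map (fun day =>
        pvEmit (lines.find? (fun line => PySem.Str.startswith (PySem.Str.lower line) (PySem.Str.lower day)))
          (PySem.Str.lower day) topic) := by
    have hstep : (fun (acc : List String) (day : String) =>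
        match lines.find? (fun line => PySem.Str.startswith (PySem.Str.lower line) (PySem.Str.lower day)) with
        | some line =>
            if PySem.Str.isIn ":" line then
              acc ++ [PySem.Str.strip (((PySem.Str.splitMax? line ":" 1).getD []).getD 1 "")]
            else
              acc ++ ["Content idea for " ++ PySem.Str.lower day ++ " about " ++ topic]
        | none => acc ++ ["Content idea for " ++ PySem.Str.lower day ++ " about " ++ topic]) =
        (fun acc day => acc ++ [pvEmit (lines.find? (fun line => PySem.Str.startswith (PySem.Str.lower line) (PySem.Str.lower day))) (PySem.Str.lower day) topic]) := by
      funext acc day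
      cases h : lines.find? (fun line => PySem.Str.startswith (PySem.Str.lower line) (PySem.Str.lower day)) with
      | none => simp [pvEmit]
      | some line =>
        by_cases hc : PySem.Str.isIn ":" line = true
        all_goals simp at hc
        all_goals simp [pvEmit, hc]
    rw [hstep, PySem.List.foldl_append_singleton_eq_map]
    simp
  rw [hA]
  -- B's table lookup is A's first-match scan
  rw [hwanted, List.map_map]
  apply List.map_congr_left
  intro day hday
  have hmem : PySem.Str.lower day ∈ wanted := by
    rw [hwanted]; exact List.mem_map_of_mem hday
  have htab := pvBuild_get? wanted (PySem.Str.lower day) hmem lines PySem.Dict.empty (by simp [PySem.Dict.get?_empty])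
  simp only [Function.comp]
  exact (congrArg (fun o => pvEmit o (PySem.Str.lower day) topic) htab).symm
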